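-- pv_equiv track=rewrite | github.com/denniselorm/python_projects | Distinct Combinations of Array Elements/Distinct Combinations of Array Elements/Distinct_Combinations_of_Array_Elements.py | arrayComb
-- ===== SOURCE A (Python) =====
-- import copy
--
-- def arrayComb(array1, array2, array3):
--     result = []
--     var1 = []
--
--     for i in range(len(array1)):
--         var = []
--         j = 0
--         while j <= len(array2)-1:
--             if array1[i] <= array2[j]:
--                 var.append(array1[i])
--                 var.append(array2[j])
--                 k = 0
--                 while k <= len(array3)-1:
--                     if array2[j] >= array3[k]:
--                         var.append(array3[k])
--                         var1 = copy.copy(var)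
--                         result.append(var1)
--                     if len(var) == 3:
--                         var.pop()
--                     k += 1
--             var = []
--             j += 1
--     result = compareArray(result)
--     return len(result)
--
-- def compareArray(result):
--     i = 0
--     while i <= len(result)-2:
--         var = copy.copy(result[i])
--         j = i + 1
--         while j <= len(result)-1:
--             if var == result[j]:
--                 del result[j]
--                 j -= 1
--             j += 1
--         i += 1
--     return result
-- ===== SOURCE B (Python) =====
-- def arrayComb(array1, array2, array3):
--     sa = set(array1)
--     sc = set(array3)
--     total = 0
--     for b in set(array2):
--         ca = sum(1 for a in sa if a <= b)
--         cc = sum(1 for c in sc if c <= b)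
--         total += ca * cc
--     return total
-- ===== Notes on version B (the rewrite author's own statement) =====
-- stated objective: faster
-- what changed: B counts distinct valid triples per middle value b as (#distinct a<=b in array1)*(#distinct c<=b in array3) summed over distinct b, instead of A's enumeration of every triple followed by a quadratic pairwise dedup of the result list.
import Mathlib
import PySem

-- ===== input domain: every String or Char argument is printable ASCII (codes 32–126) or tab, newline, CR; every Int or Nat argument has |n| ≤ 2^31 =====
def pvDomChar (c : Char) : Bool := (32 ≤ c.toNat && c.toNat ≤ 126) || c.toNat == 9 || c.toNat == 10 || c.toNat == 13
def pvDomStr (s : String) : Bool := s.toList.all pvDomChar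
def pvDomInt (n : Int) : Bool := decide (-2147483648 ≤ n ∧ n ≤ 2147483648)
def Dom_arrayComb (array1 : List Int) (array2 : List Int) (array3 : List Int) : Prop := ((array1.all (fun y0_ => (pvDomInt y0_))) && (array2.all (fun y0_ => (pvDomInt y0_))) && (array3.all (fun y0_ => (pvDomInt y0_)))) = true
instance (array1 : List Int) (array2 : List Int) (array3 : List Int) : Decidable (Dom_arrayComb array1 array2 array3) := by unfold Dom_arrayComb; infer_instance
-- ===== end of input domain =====

-- B replaces A's cubic triple enumeration plus quadratic dedup by a per-middle-value
-- product count over the three deduplicated arrays (objective: faster).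

-- ===== PORT A =====
-- compareArray: for each i, the inner while (with del / j -= 1) removes every LATER
-- element equal to result[i]; ported step for step: keep the head, recurse on the
-- tail with the head's later copies removed (the exact same kept list, same order).
def compareArrayA (l : List (List Int)) : List (List Int) :=
  match l with
  | [] => []
  | x :: xs => x :: compareArrayA (xs.filter (fun y => y ≠ x))
termination_by l.length
decreasing_by
  simp only [List.length_unattach, List.length_cons]
  exact Nat.lt_succ_of_le ((List.length_filter_le _ _).trans_eq (by simp))

-- arrayComb: the three nested loops append [array1[i], array2[j], array3[k]] whenever
-- array1[i] <= array2[j] and array2[j] >= array3[k] (the 'var.pop()' only restores var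
-- to [a, b], it never changes what was appended to result); then compareArray dedups
-- and the length of the deduplicated list is returned.
def arrayComb (array1 : List Int) (array2 : List Int) (array3 : List Int) : Int :=
  let result :=
    array1.foldl (fun res a =>
      array2.foldl (fun res b =>
        if a ≤ b then
          array3.foldl (fun res c => if b ≥ c then res ++ [[a, b, c]] else res) res
        else res) res) ([] : List (List Int))
  ((compareArrayA result).length : Int)

-- ===== PORT B =====
def arrayComb_alt (array1 : List Int) (array2 : List Int) (array3 : List Int) : Int :=
  let sa := PySem.Set.ofList array1
  let sc := PySem.Set.ofList array3
  (PySem.Set.ofList array2).foldl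
    (fun total b =>
      total + (sa.foldl (fun n a => if a ≤ b then n + 1 else n) (0 : Int))
            * (sc.foldl (fun n c => if c ≤ b then n + 1 else n) (0 : Int))) 0

-- ===== PRECONDITION & SPEC =====
def Spec_arrayComb (array1 : List Int) (array2 : List Int) (array3 : List Int) (out : Int) : Prop := out = arrayComb_alt array1 array2 array3
instance (array1 : List Int) (array2 : List Int) (array3 : List Int) (out : Int) : Decidable (Spec_arrayComb array1 array2 array3 out) := by unfold Spec_arrayComb; infer_instance

-- ===== CLAIM (what is proved, stated in full; the proofs are below) =====
def Claim_equal_arrayComb : Prop := ∀ (array1 : List Int) (array2 : List Int) (array3 : List Int), Dom_arrayComb array1 array2 array3 → Spec_arrayComb array1 array2 array3 (arrayComb array1 array2 array3)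

-- ===== LEMMAS AND PROOFS =====

-- The list of (possibly repeated) valid triples A enumerates, as a flatMap.
def triplesL (array1 : List Int) (array2 : List Int) (array3 : List Int) : List (List Int) :=
  array1.flatMap (fun a =>
    array2.flatMap (fun b =>
      if a ≤ b then (array3.filter (fun c => c ≤ b)).map (fun c => [a, b, c]) else []))

theorem compareArrayA_nil : compareArrayA [] = [] := by
  rw [compareArrayA.eq_def]

theorem compareArrayA_cons (x : List Int) (xs : List (List Int)) :
    compareArrayA (x :: xs) = x :: compareArrayA (xs.filter (fun y => y ≠ x)) := by
  rw [compareArrayA.eq_def]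

theorem inner_fold_eq (a b : Int) (a3 : List Int) (res : List (List Int)) :
    a3.foldl (fun res c => if b ≥ c then res ++ [[a, b, c]] else res) res
      = res ++ (a3.filter (fun c => c ≤ b)).map (fun c => [a, b, c]) := by
  simpa [ge_iff_le] using
    PySem.List.foldl_append_if (p := fun c => c ≤ b) (f := fun c => [a, b, c]) (l := a3) (acc := res)

theorem arrayComb_result_eq (a1 a2 a3 : List Int) :
    a1.foldl (fun res a =>
      a2.foldl (fun res b =>
        if a ≤ b then
          a3.foldl (fun res c => if b ≥ c then res ++ [[a, b, c]] else res) res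
        else res) res) ([] : List (List Int)) = triplesL a1 a2 a3 := by
  have hmid : ∀ (a : Int) (res : List (List Int)),
      a2.foldl (fun res b =>
        if a ≤ b then
          a3.foldl (fun res c => if b ≥ c then res ++ [[a, b, c]] else res) res
        else res) res
      = res ++ a2.flatMap (fun b =>
          if a ≤ b then (a3.filter (fun c => c ≤ b)).map (fun c => [a, b, c]) else []) := by
    intro a res
    have hstep : a2.foldl (fun res b =>
        if a ≤ b then
          a3.foldl (fun res c => if b ≥ c then res ++ [[a, b, c]] else res) res
        else res) res
      = a2.foldl (fun res b =>
          res ++ (if a ≤ b then (a3.filter (fun c => c ≤ b)).map (fun c => [a, b, c]) else [])) res := by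
      apply List.foldl_ext
      intro res' b _
      by_cases h : a ≤ b
      · simp [h, inner_fold_eq]
      · simp [h]
    rw [hstep, PySem.List.foldl_append_eq_flatMap]
  have hstep : a1.foldl (fun res a =>
      a2.foldl (fun res b =>
        if a ≤ b then
          a3.foldl (fun res c => if b ≥ c then res ++ [[a, b, c]] else res) res
        else res) res) ([] : List (List Int))
    = a1.foldl (fun res a =>
        res ++ a2.flatMap (fun b =>
          if a ≤ b then (a3.filter (fun c => c ≤ b)).map (fun c => [a, b, c]) else [])) [] := by
    apply List.foldl_ext
    intro res a _
    exact hmid a res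
  rw [hstep, PySem.List.foldl_append_eq_flatMap, List.nil_append, triplesL]

theorem mem_triplesL {a1 a2 a3 : List Int} {x : List Int} :
    x ∈ triplesL a1 a2 a3 ↔
      ∃ a ∈ a1, ∃ b ∈ a2, ∃ c ∈ a3, a ≤ b ∧ c ≤ b ∧ x = [a, b, c] := by
  simp only [triplesL, List.mem_flatMap]
  constructor
  · rintro ⟨a, ha, b, hb, hx⟩
    by_cases h : a ≤ b
    · simp only [h, if_true, List.mem_map, List.mem_filter] at hx
      obtain ⟨c, ⟨hc, hcb⟩, rfl⟩ := hx
      exact ⟨a, ha, b, hb, c, hc, h, by simpa using hcb, rfl⟩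
    · simp [h] at hx
  · rintro ⟨a, ha, b, hb, c, hc, hab, hcb, rfl⟩
    exact ⟨a, ha, b, hb, by simp [hab, List.mem_filter, hc, hcb]⟩

theorem compareArrayA_mem (x : List Int) :
    ∀ (n : Nat) (l : List (List Int)), l.length = n → (x ∈ compareArrayA l ↔ x ∈ l) := by
  intro n
  induction n using Nat.strong_induction_on with
  | _ n ih =>
    intro l hl
    match l with
    | [] => simp [compareArrayA_nil]
    | y :: ys =>
      rw [compareArrayA_cons]
      have hlen : (ys.filter (fun z => z ≠ y)).length < n := by
        subst hl
        exact Nat.lt_succ_of_le (List.length_filter_le _ _)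
      rw [List.mem_cons, ih _ hlen _ rfl, List.mem_cons, List.mem_filter]
      by_cases hxy : x = y <;> simp [hxy]

theorem compareArrayA_nodup :
    ∀ (n : Nat) (l : List (List Int)), l.length = n → (compareArrayA l).Nodup := by
  intro n
  induction n using Nat.strong_induction_on with
  | _ n ih =>
    intro l hl
    match l with
    | [] => simp [compareArrayA_nil]
    | y :: ys =>
      rw [compareArrayA_cons]
      have hlen : (ys.filter (fun z => z ≠ y)).length < n := by
        subst hl
        exact Nat.lt_succ_of_le (List.length_filter_le _ _)
      refine List.nodup_cons.mpr ⟨?_, ih _ hlen _ rfl⟩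
      intro hmem
      rw [compareArrayA_mem _ _ _ rfl, List.mem_filter] at hmem
      simp at hmem

theorem compareArrayA_length (l : List (List Int)) :
    (compareArrayA l).length = l.toFinset.card := by
  have h1 : (compareArrayA l).toFinset = l.toFinset := by
    ext x; simp [compareArrayA_mem x _ l rfl]
  rw [← h1, List.toFinset_card_of_nodup (compareArrayA_nodup _ l rfl)]

-- the Finset of triples contributed by a fixed middle value b
def midFin (b : Int) (S T : Finset Int) : Finset (List Int) :=
  ((S.filter (fun a => a ≤ b)) ×ˢ (T.filter (fun c => c ≤ b))).image (fun p => [p.1, b, p.2])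

theorem mem_midFin {b : Int} {S T : Finset Int} {xs : List Int} :
    xs ∈ midFin b S T ↔ ∃ a ∈ S, ∃ c ∈ T, a ≤ b ∧ c ≤ b ∧ xs = [a, b, c] := by
  simp only [midFin, Finset.mem_image, Finset.mem_product, Finset.mem_filter, Prod.exists]
  constructor
  · rintro ⟨a, c, ⟨⟨ha, hax⟩, hc, hcx⟩, rfl⟩
    exact ⟨a, ha, c, hc, hax, hcx, rfl⟩
  · rintro ⟨a, ha, c, hc, hax, hcx, rfl⟩
    exact ⟨a, c, ⟨⟨ha, hax⟩, hc, hcx⟩, rfl⟩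

theorem triples_toFinset (a1 a2 a3 : List Int) :
    (triplesL a1 a2 a3).toFinset
      = a2.toFinset.biUnion (fun b => midFin b a1.toFinset a3.toFinset) := by
  ext xs
  simp only [List.mem_toFinset, mem_triplesL, Finset.mem_biUnion, mem_midFin]
  constructor
  · rintro ⟨a, ha, b, hb, c, hc, hab, hcb, rfl⟩
    exact ⟨b, hb, a, ha, c, hc, hab, hcb, rfl⟩
  · rintro ⟨b, hb, a, ha, c, hc, hab, hcb, rfl⟩
    exact ⟨a, ha, b, hb, c, hc, hab, hcb, rfl⟩

theorem midFin_card (b : Int) (S T : Finset Int) :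
    (midFin b S T).card
      = (S.filter (fun a => a ≤ b)).card * (T.filter (fun c => c ≤ b)).card := by
  rw [midFin, Finset.card_image_of_injOn, Finset.card_product]
  intro p _ q _ h
  simp only [List.cons.injEq] at h
  exact Prod.ext h.1 h.2.2.1

theorem triples_card (a1 a2 a3 : List Int) :
    (triplesL a1 a2 a3).toFinset.card
      = ∑ b ∈ a2.toFinset,
          (a1.toFinset.filter (fun a => a ≤ b)).card
            * (a3.toFinset.filter (fun c => c ≤ b)).card := by
  have hdisj : ∀ b1 ∈ a2.toFinset, ∀ b2 ∈ a2.toFinset, b1 ≠ b2 →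
      Disjoint (midFin b1 a1.toFinset a3.toFinset) (midFin b2 a1.toFinset a3.toFinset) := by
    intro b1 _ b2 _ hne
    rw [Finset.disjoint_left]
    intro xs h1 h2
    rw [mem_midFin] at h1 h2
    obtain ⟨a, _, c, _, _, _, rfl⟩ := h1
    obtain ⟨a', _, c', _, _, _, heq⟩ := h2
    simp only [List.cons.injEq] at heq
    exact hne heq.2.1
  rw [triples_toFinset, Finset.card_biUnion hdisj]
  exact Finset.sum_congr rfl (fun b _ => midFin_card b _ _)

theorem countP_ofList (xs : List Int) (p : Int → Bool) :
    (PySem.Set.ofList xs).countP p = (xs.toFinset.filter (fun x => p x)).card := by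
  have hnd : ((PySem.Set.ofList xs).filter p).Nodup := (PySem.Set.nodup_ofList xs).filter p
  rw [List.countP_eq_length_filter, ← List.toFinset_card_of_nodup hnd]
  congr 1
  ext x
  simp [PySem.Set.mem_ofList, Finset.mem_filter]

theorem arrayComb_alt_eq (a1 a2 a3 : List Int) :
    arrayComb_alt a1 a2 a3
      = ∑ b ∈ a2.toFinset,
          ((a1.toFinset.filter (fun a => a ≤ b)).card : Int)
            * ((a3.toFinset.filter (fun c => c ≤ b)).card : Int) := by
  unfold arrayComb_alt
  simp only [PySem.List.foldl_ite_add_one, zero_add]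
  rw [PySem.List.foldl_add (l := PySem.Set.ofList a2)
    (g := fun b => ((PySem.Set.ofList a1).countP (fun a => a ≤ b) : Int)
      * ((PySem.Set.ofList a3).countP (fun c => c ≤ b) : Int)) (a := 0)]
  have h2 : (PySem.Set.ofList a2).toFinset = a2.toFinset := by
    ext x; simp [PySem.Set.mem_ofList]
  rw [zero_add, ← h2, ← List.sum_toFinset _ (PySem.Set.nodup_ofList a2)]
  refine Finset.sum_congr rfl (fun b _ => ?_)
  rw [countP_ofList, countP_ofList]
  norm_num

-- ===== VERDICT (by name: the statement is the Claim_ definition above) =====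
theorem arrayComb_spec : Claim_equal_arrayComb := by
  intro a1 a2 a3 _
  unfold Spec_arrayComb
  show arrayComb a1 a2 a3 = arrayComb_alt a1 a2 a3
  rw [arrayComb, arrayComb_result_eq, arrayComb_alt_eq, compareArrayA_length, triples_card]
  push_cast
  rfl
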